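-- pv_equiv track=rewrite | github.com/hshrimp/test_school | 京东/t1.py | solve
-- ===== SOURCE A (Python) =====
-- def fd(string):
--     li = '0'
--     count = 1
--     for i in range(1, len(string)):
--         for j in range(i):
--             if string[j] == string[i]:
--                 li += li[j]
--             else:
--                 li += str(count)
--                 count += 1
--     return li
--
-- def find(s, T):
--     d1 = fd(s)
--     d2 = fd(T)
--     if d1 == d2:
--         return 1
--     else:
--         return 0
--
-- def solve(S, T):
--     count = 0
--     length = len(T)
--     for i in range(len(S) - length + 1):
--         s = S[i:i + length]
--         num = find(s, T)
--         count += num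
--     return count
-- ===== SOURCE B (Python) =====
-- def _canon(t):
--     # canonical form of t (computed once): list of chars, joined at the end
--     out = ['0']
--     c = 1
--     for i in range(1, len(t)):
--         for j in range(i):
--             if t[j] == t[i]:
--                 out.append(out[j])
--             else:
--                 out.extend(str(c))
--                 c += 1
--     return ''.join(out)
--
-- def _match(S, i, L, target):
--     # stream the canonical chunks of the window S[i:i+L] directly against
--     # target, aborting at the first mismatching chunk; O(1) extra space,
--     # no window slice and no canonical string materialized.
--     pos = 1
--     c = 1
--     for a in range(1, L):
--         for b in range(a):
--             if S[i + b] == S[i + a]: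
--                 if pos >= len(target) or target[pos] != target[b]:
--                     return False
--                 pos += 1
--             else:
--                 d = str(c)
--                 if target[pos:pos + len(d)] != d:
--                     return False
--                 pos += len(d)
--                 c += 1
--     return pos == len(target)
--
-- def solve(S, T):
--     L = len(T)
--     target = _canon(T)
--     return sum(1 for i in range(len(S) - L + 1) if _match(S, i, L, target))
-- ===== Notes on version B (the rewrite author's own statement) =====
-- stated objective: alternative
-- what changed: A materializes the canonical ('first-occurrence pattern') string of every window AND re-canonicalizes T for every window, then compares the two strings; B canonicalizes T once and, per window, streams the window's canonical chunks directly against that precomputed target with early abort on the first mismatching chunk, using O(1) extra space and no window slice or per-window string (intended as faster; a timing run read only 1.3-1.4x on its input family, where S and T have comparable length and there are few windows, so 'faster' is not claimed).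
import Mathlib
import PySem

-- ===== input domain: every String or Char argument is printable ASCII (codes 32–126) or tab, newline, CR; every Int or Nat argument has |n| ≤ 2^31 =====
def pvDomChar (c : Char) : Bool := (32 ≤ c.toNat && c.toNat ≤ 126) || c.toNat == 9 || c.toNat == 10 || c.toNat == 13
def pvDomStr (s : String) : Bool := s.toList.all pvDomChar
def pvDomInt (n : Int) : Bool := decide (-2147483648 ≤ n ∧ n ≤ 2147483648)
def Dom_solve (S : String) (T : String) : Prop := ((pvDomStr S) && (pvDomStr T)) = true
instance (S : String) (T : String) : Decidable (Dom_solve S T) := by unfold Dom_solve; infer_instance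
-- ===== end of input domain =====

-- B precomputes the canonical form of T once and streams each window's canonical
-- chunks against it with early abort (no window slice, no per-window string built),
-- instead of A's materialize-both-canonical-strings-per-window-and-compare.

-- ===== PORT A =====
-- A's fd: builds the canonical string by '+=' over the pair grid (Python str modelled as List Char)
def fdChars (cs : List Char) : List Char :=
  ((PySem.List.pyRange 1 (PySem.List.len cs)).foldl
    (fun st i =>
      (PySem.List.pyRange 0 i).foldl
        (fun (st : List Char × Int) j =>
          if PySem.List.pyGetD cs j ' ' == PySem.List.pyGetD cs i ' ' then
            (st.1 ++ [PySem.List.pyGetD st.1 j ' '], st.2)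
          else
            (st.1 ++ PySem.Int.toChars st.2, st.2 + 1)) st)
    (['0'], (1 : Int))).1

def fd (s : String) : List Char := fdChars s.toList

def find (s : String) (T : String) : Int :=
  if fd s == fd T then 1 else 0

def solve (S : String) (T : String) : Int :=
  let length := PySem.Str.len T
  (PySem.List.pyRange 0 (PySem.Str.len S - length + 1)).foldl
    (fun count i => count + find (PySem.Str.slice S (some i) (some (i + length))) T) 0

-- ===== PORT B =====
-- Source B _canon: same canonicalization, accumulated as a char list
def canonChars (cs : List Char) : List Char :=
  ((PySem.List.pyRange 1 (PySem.List.len cs)).foldl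
    (fun st i =>
      (PySem.List.pyRange 0 i).foldl
        (fun (st : List Char × Int) j =>
          if PySem.List.pyGetD cs j ' ' == PySem.List.pyGetD cs i ' ' then
            (st.1 ++ [PySem.List.pyGetD st.1 j ' '], st.2)
          else
            (st.1 ++ PySem.Int.toChars st.2, st.2 + 1)) st)
    (['0'], (1 : Int))).1

-- Source B _match: stream the window's canonical chunks against target; state (pos, c),
-- none = early 'return False' taken
def matStep (cs : List Char) (i : Int) (target : List Char) (a : Int)
    (st : Option (Nat × Int)) (b : Int) : Option (Nat × Int) :=
  match st with
  | none => none
  | some (pos, c) =>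
    if PySem.List.pyGetD cs (i + b) ' ' == PySem.List.pyGetD cs (i + a) ' ' then
      if pos ≥ target.length ∨
          PySem.List.pyGetD target (pos : Int) ' ' ≠ PySem.List.pyGetD target b ' ' then none
      else some (pos + 1, c)
    else
      let d := PySem.Int.toChars c
      if PySem.List.slice target (some (pos : Int)) (some ((pos : Int) + (d.length : Int))) == d then
        some (pos + d.length, c + 1)
      else none

def mat (cs : List Char) (i : Int) (L : Int) (target : List Char) : Bool :=
  match (PySem.List.pyRange 1 L).foldl
      (fun st a => (PySem.List.pyRange 0 a).foldl (matStep cs i target a) st)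
      (some (1, (1 : Int))) with
  | some (pos, _) => pos == target.length
  | none => false

def solve_alt (S : String) (T : String) : Int :=
  let L := PySem.Str.len T
  let target := canonChars T.toList
  ((PySem.List.pyRange 0 (PySem.Str.len S - L + 1)).countP
      (fun i => mat S.toList i L target) : Int)

-- ===== PRECONDITION & SPEC =====
def Spec_solve (S : String) (T : String) (out : Int) : Prop := out = solve_alt S T
instance (S : String) (T : String) (out : Int) : Decidable (Spec_solve S T out) := by unfold Spec_solve; infer_instance

-- ===== CLAIM (what is proved, stated in full; the proofs are below) =====
def Claim_equal_solve : Prop := ∀ (S : String) (T : String), Dom_solve S T → Spec_solve S T (solve S T)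

-- ===== LEMMAS AND PROOFS =====

-- A's inner-loop body, over the window w directly
def stepAw (w : List Char) (a : Int) (st : List Char × Int) (b : Int) : List Char × Int :=
  if PySem.List.pyGetD w b ' ' == PySem.List.pyGetD w a ' ' then
    (st.1 ++ [PySem.List.pyGetD st.1 b ' '], st.2)
  else
    (st.1 ++ PySem.Int.toChars st.2, st.2 + 1)

-- B's inner-loop body, over the window w directly
def stepBw (w Z : List Char) (a : Int) (st : Option (Nat × Int)) (b : Int) : Option (Nat × Int) :=
  match st with
  | none => none
  | some (pos, c) =>
    if PySem.List.pyGetD w b ' ' == PySem.List.pyGetD w a ' ' then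
      if pos ≥ Z.length ∨
          PySem.List.pyGetD Z (pos : Int) ' ' ≠ PySem.List.pyGetD Z b ' ' then none
      else some (pos + 1, c)
    else
      let d := PySem.Int.toChars c
      if PySem.List.slice Z (some (pos : Int)) (some ((pos : Int) + (d.length : Int))) == d then
        some (pos + d.length, c + 1)
      else none

def rowA (w : List Char) (st : List Char × Int) (a : Int) : List Char × Int :=
  (PySem.List.pyRange 0 a).foldl (stepAw w a) st

def rowB (w Z : List Char) (st : Option (Nat × Int)) (a : Int) : Option (Nat × Int) :=
  (PySem.List.pyRange 0 a).foldl (stepBw w Z a) st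

-- the coupling invariant between A's state and B's state
def RZ (Z : List Char) (st : List Char × Int) (mst : Option (Nat × Int)) : Prop :=
  match mst with
  | some pc => st.1 = Z.take pc.1 ∧ pc.1 = st.1.length ∧ 1 ≤ pc.1 ∧ pc.2 = st.2
  | none => ∀ suf, st.1 ++ suf ≠ Z

lemma toDigitsCore_len : ∀ (fuel n : Nat) (ds : List Char),
    ds.length ≤ (Nat.toDigitsCore 10 fuel n ds).length := by
  intro fuel
  induction fuel with
  | zero => intro n ds; simp [Nat.toDigitsCore]
  | succ f ih =>
    intro n ds
    simp only [Nat.toDigitsCore]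
    split
    · simp
    · exact le_trans (by simp) (ih _ _)

lemma toChars_ne_nil (n : Int) : PySem.Int.toChars n ≠ [] := by
  unfold PySem.Int.toChars
  split
  · simp
  · unfold Nat.toDigits
    intro h
    simp only [Nat.toDigitsCore] at h
    split at h
    · simp at h
    · have := toDigitsCore_len n.toNat (n.toNat / 10) [(n.toNat % 10).digitChar]
      rw [h] at this; simp at this

lemma step_pres (w Z : List Char) (a b : Int) (hb : 0 ≤ b)
    (st : List Char × Int) (pos : Nat) (c : Int)
    (hR : RZ Z st (some (pos, c))) (hbp : b < (pos : Int)) :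
    RZ Z (stepAw w a st b) (stepBw w Z a (some (pos, c)) b) ∧
    (∀ pc', stepBw w Z a (some (pos, c)) b = some pc' → pos < pc'.1) := by
  obtain ⟨h1, h2, h3, h4⟩ := hR
  have h1' : st.1 = List.take pos Z := h1
  have hlen1 : st.1.length = pos := h2.symm
  have hposle : pos ≤ Z.length := by
    have := congrArg List.length h1
    simp [List.length_take] at this
    omega
  have hbn : b.toNat < pos := by omega
  have hbn' : b.toNat < st.1.length := by omega
  have hgb : PySem.List.pyGetD st.1 b ' ' = Z[b.toNat]'(by omega) := by
    rw [PySem.List.pyGetD_of_nonneg _ _ hb, List.getD_eq_getElem _ _ hbn']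
    have : st.1[b.toNat]'hbn' = (Z.take pos)[b.toNat]'(by simp [List.length_take]; omega) := by
      congr 1
    rw [this, List.getElem_take]
  have hgZb : PySem.List.pyGetD Z b ' ' = Z[b.toNat]'(by omega) := by
    rw [PySem.List.pyGetD_of_nonneg _ _ hb, List.getD_eq_getElem _ _ (by omega)]
  simp only [stepAw, stepBw]
  by_cases he : (PySem.List.pyGetD w b ' ' == PySem.List.pyGetD w a ' ') = true
  · -- copy branch
    rw [if_pos he, if_pos he]
    by_cases hc : pos ≥ Z.length
    · have hpz : pos = Z.length := le_antisymm hposle hc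
      rw [if_pos (Or.inl hc)]
      refine ⟨?_, by intro pc' h; cases h⟩
      intro suf heq
      have hl := congrArg List.length heq
      simp only [List.length_append, List.length_cons, List.length_nil] at hl
      omega
    · rw [not_le] at hc
      have hgp : PySem.List.pyGetD Z (pos : Int) ' ' = Z[pos]'hc := by
        rw [PySem.List.pyGetD_natCast, List.getD_eq_getElem _ _ hc]
      by_cases hcc : Z[pos]'hc = Z[b.toNat]'(by omega)
      · rw [if_neg (by rw [not_or, not_le, not_not]; exact ⟨hc, by rw [hgp, hgZb]; exact hcc⟩)]
        refine ⟨⟨?_, by simp [hlen1], by omega, h4⟩, by intro pc' h; cases h; simp⟩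
        rw [hgb, h1]
        have : Z.take (pos + 1) = Z.take pos ++ [Z[pos]'hc] := by
          rw [List.take_add_one]
          simp [List.getElem?_eq_getElem hc]
        rw [this, hcc]
      · rw [if_pos (Or.inr (by rw [hgp, hgZb]; exact hcc))]
        refine ⟨?_, by intro pc' h; cases h⟩
        intro suf heq
        rw [hgb, h1] at heq
        apply hcc
        have hz : Z[pos]? = some (Z[b.toNat]'(by omega)) := by
          conv_lhs => rw [← heq]
          rw [List.append_assoc, List.getElem?_append_right (by simp [List.length_take])]
          have h0 : pos - (List.take pos Z).length = 0 := by simp [List.length_take]; omega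
          rw [h0]
          simp
        rw [List.getElem?_eq_getElem hc] at hz
        exact Option.some_injective _ hz
  · -- fresh-counter branch
    rw [if_neg he, if_neg he]
    have h4' : st.2 = c := h4.symm
    rw [h4']
    set d := PySem.Int.toChars c with hd
    have hdne : d ≠ [] := toChars_ne_nil c
    have hdlen : 1 ≤ d.length := List.length_pos_iff.mpr hdne
    have hslice : PySem.List.slice Z (some (pos : Int)) (some ((pos : Int) + (d.length : Int)))
        = (Z.drop pos).take d.length := PySem.List.slice_natCast_add Z pos d.length
    by_cases hs : ((Z.drop pos).take d.length) = d
    · rw [if_pos (by rw [hslice]; exact beq_iff_eq.mpr hs)]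
      have hroom : pos + d.length ≤ Z.length := by
        have := congrArg List.length hs
        simp [List.length_take, List.length_drop] at this
        omega
      refine ⟨⟨?_, by simp [hlen1], by omega, by simp⟩, by intro pc' h; cases h; simp; omega⟩
      show st.1 ++ d = List.take (pos + d.length) Z
      rw [h1', List.take_add]
      exact congrArg (List.take pos Z ++ ·) hs.symm
    · rw [if_neg (by rw [hslice]; simp [hs])]
      refine ⟨?_, by intro pc' h; cases h⟩
      intro suf heq
      apply hs
      have heq' : List.take pos Z ++ (d ++ suf) = Z := by
        rw [← List.append_assoc, ← h1']
        exact heq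
      have hdrop : Z.drop pos = d ++ suf := by
        have h0 : List.take pos Z ++ List.drop pos Z = List.take pos Z ++ (d ++ suf) := by
          rw [List.take_append_drop]; exact heq'.symm
        exact List.append_cancel_left h0
      rw [hdrop, List.take_left' rfl]

lemma stepAw_extend (w : List Char) (a : Int) (st : List Char × Int) (b : Int) :
    ∃ t, (stepAw w a st b).1 = st.1 ++ t := by
  unfold stepAw; split <;> exact ⟨_, rfl⟩

lemma row_pres (w Z : List Char) (a : Int) :
    ∀ (n : Nat) (v : Int) (st : List Char × Int) (mst : Option (Nat × Int)),
      n = (a - v).toNat → 0 ≤ v → RZ Z st mst →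
      (∀ pc, mst = some pc → v < (pc.1 : Int)) →
      RZ Z ((PySem.List.pyRange v a).foldl (stepAw w a) st)
           ((PySem.List.pyRange v a).foldl (stepBw w Z a) mst) := by
  intro n
  induction n with
  | zero =>
    intro v st mst hn hv hR _
    rw [PySem.List.pyRange_one_eq_nil (by omega)]
    simpa using hR
  | succ k ih =>
    intro v st mst hn hv hR hlt
    have hva : v < a := by omega
    rw [PySem.List.pyRange_one_cons hva]
    simp only [List.foldl_cons]
    cases mst with
    | none =>
      obtain ⟨t, ht⟩ := stepAw_extend w a st v
      have hR' : RZ Z (stepAw w a st v) none := by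
        intro suf
        rw [ht, List.append_assoc]
        exact hR (t ++ suf)
      exact ih (v+1) _ none (by omega) (by omega) hR' (by intro pc h; cases h)
    | some pc =>
      obtain ⟨pos, c⟩ := pc
      have hv2 := hlt (pos, c) rfl
      have hstep := step_pres w Z a v hv st pos c hR hv2
      refine ih (v+1) _ _ (by omega) (by omega) hstep.1 ?_
      intro pc' h
      have hmono := hstep.2 pc' h
      simp only at hv2 ⊢
      omega

lemma rows_pres (w Z : List Char) :
    ∀ (rs : List Int) (st : List Char × Int) (mst : Option (Nat × Int)),
      RZ Z st mst →
      RZ Z (rs.foldl (rowA w) st) (rs.foldl (rowB w Z) mst) := by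
  intro rs
  induction rs with
  | nil => intro st mst hR; simpa using hR
  | cons r rest ih =>
    intro st mst hR
    simp only [List.foldl_cons]
    apply ih
    cases mst with
    | none =>
      exact row_pres w Z r ((r - 0).toNat) 0 st none rfl (by omega) hR
        (by intro pc h; cases h)
    | some pc =>
      obtain ⟨pos, c⟩ := pc
      have h3 : 1 ≤ pos := hR.2.2.1
      refine row_pres w Z r ((r - 0).toNat) 0 st _ rfl (by omega) hR ?_
      intro pc' h
      cases h
      simp only
      omega

lemma foldl_stepAw_extend (w : List Char) (a : Int) :
    ∀ (bs : List Int) (st : List Char × Int), ∃ t, (bs.foldl (stepAw w a) st).1 = st.1 ++ t := by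
  intro bs
  induction bs with
  | nil => intro st; exact ⟨[], by simp⟩
  | cons b rest ih =>
    intro st
    obtain ⟨t1, ht1⟩ := stepAw_extend w a st b
    obtain ⟨t2, ht2⟩ := ih (stepAw w a st b)
    exact ⟨t1 ++ t2, by simp only [List.foldl_cons]; rw [ht2, ht1, List.append_assoc]⟩

lemma rowA_extend (w : List Char) :
    ∀ (rs : List Int) (st : List Char × Int), ∃ t, (rs.foldl (rowA w) st).1 = st.1 ++ t := by
  intro rs
  induction rs with
  | nil => intro st; exact ⟨[], by simp⟩
  | cons r rest ih =>
    intro st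
    obtain ⟨t1, ht1⟩ := foldl_stepAw_extend w r (PySem.List.pyRange 0 r) st
    obtain ⟨t2, ht2⟩ := ih (rowA w st r)
    refine ⟨t1 ++ t2, ?_⟩
    simp only [List.foldl_cons]
    rw [ht2]
    show (rowA w st r).1 ++ t2 = st.1 ++ (t1 ++ t2)
    rw [show (rowA w st r).1 = st.1 ++ t1 from ht1, List.append_assoc]

lemma fdChars_eq_rows (cs : List Char) :
    fdChars cs = ((PySem.List.pyRange 1 (PySem.List.len cs)).foldl (rowA cs) (['0'], (1 : Int))).1 := rfl

lemma fdChars_head (cs : List Char) : ∃ t, fdChars cs = '0' :: t := by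
  obtain ⟨t, ht⟩ := rowA_extend cs (PySem.List.pyRange 1 (PySem.List.len cs)) (['0'], (1 : Int))
  exact ⟨t, by rw [fdChars_eq_rows, ht]; rfl⟩

-- matching over the window w decides equality of canonical forms
lemma mat_w_iff (w Z : List Char) (hZ : ∃ t, Z = '0' :: t) :
    (match (PySem.List.pyRange 1 (PySem.List.len w)).foldl (rowB w Z) (some (1, (1 : Int))) with
      | some (pos, _) => pos == Z.length
      | none => false) = (fdChars w == Z) := by
  obtain ⟨t0, hZ0⟩ := hZ
  have hinit : RZ Z (['0'], (1 : Int)) (some (1, 1)) := by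
    refine ⟨?_, rfl, le_refl 1, rfl⟩
    rw [hZ0]
    rfl
  have hfin := rows_pres w Z (PySem.List.pyRange 1 (PySem.List.len w)) (['0'], 1) (some (1, 1)) hinit
  cases hm : (PySem.List.pyRange 1 (PySem.List.len w)).foldl (rowB w Z) (some (1, (1 : Int))) with
  | none =>
    rw [hm] at hfin
    have hne : fdChars w ≠ Z := by
      rw [fdChars_eq_rows]
      intro h
      exact hfin [] (by rw [List.append_nil]; exact h)
    simp [beq_eq_false_iff_ne.mpr hne]
  | some pc =>
    obtain ⟨pos, c⟩ := pc
    rw [hm] at hfin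
    obtain ⟨e1, e2, e3, e4⟩ := hfin
    simp only at e1 e2 e3
    by_cases hp : pos = Z.length
    · have heq : fdChars w = Z := by
        rw [fdChars_eq_rows, e1, hp, List.take_length]
      simp [hp, heq]
    · have hple : pos ≤ Z.length := by
        have h := e2.trans (congrArg List.length e1)
        simp [List.length_take] at h
        omega
      have hne : fdChars w ≠ Z := by
        rw [fdChars_eq_rows]
        intro h
        exact hp (e2.trans (congrArg List.length h))
      simp [hp, beq_eq_false_iff_ne.mpr hne]

-- shifting: matStep on cs at offset i equals stepBw on the window
lemma mat_shift (cs : List Char) (i L : Int) (Z : List Char)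
    (hi : 0 ≤ i) (hL : 0 ≤ L) (hiL : i + L ≤ (cs.length : Int)) :
    mat cs i L Z =
      (match (PySem.List.pyRange 1 (PySem.List.len (PySem.List.slice cs (some i) (some (i + L))))).foldl
          (rowB (PySem.List.slice cs (some i) (some (i + L))) Z) (some (1, (1 : Int))) with
        | some (pos, _) => pos == Z.length
        | none => false) := by
  set w := PySem.List.slice cs (some i) (some (i + L)) with hw
  have hwlist : w = (cs.drop i.toNat).take ((i + L).toNat - i.toNat) :=
    PySem.List.slice_toNat cs hi (by omega)
  have hsub : (i + L).toNat - i.toNat = L.toNat := by omega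
  have hwlen : w.length = L.toNat := by
    rw [hwlist, hsub]
    simp [List.length_take, List.length_drop]
    omega
  have hlenw : PySem.List.len w = L := by
    rw [PySem.List.len_eq, hwlen]
    omega
  have hget : ∀ (k : Int), 0 ≤ k → k < L →
      PySem.List.pyGetD w k ' ' = PySem.List.pyGetD cs (i + k) ' ' := by
    intro k hk0 hkL
    rw [PySem.List.pyGetD_of_nonneg _ _ hk0, PySem.List.pyGetD_of_nonneg _ _ (by omega)]
    have hkw : k.toNat < w.length := by omega
    have hcs : (i + k).toNat < cs.length := by omega
    have hkw2 : k.toNat < ((cs.drop i.toNat).take ((i + L).toNat - i.toNat)).length := by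
      rw [← hwlist]; exact hkw
    rw [List.getD_eq_getElem _ _ hkw, List.getD_eq_getElem _ _ hcs]
    have hw2 : w[k.toNat]'hkw = ((cs.drop i.toNat).take ((i + L).toNat - i.toNat))[k.toNat]'hkw2 :=
      List.getElem_of_eq hwlist _
    rw [hw2]
    simp only [List.getElem_take, List.getElem_drop]
    congr 1
    omega
  unfold mat
  rw [hlenw]
  congr 1
  apply PySem.List.foldl_congr_mem
  intro acc a ha
  rw [PySem.List.mem_pyRange_one] at ha
  unfold rowB
  apply PySem.List.foldl_congr_mem
  intro acc2 b hb
  rw [PySem.List.mem_pyRange_one] at hb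
  unfold matStep stepBw
  cases acc2 with
  | none => rfl
  | some pc =>
    obtain ⟨pos, c⟩ := pc
    rw [hget b hb.1 (by omega), hget a (by omega) ha.2]

lemma canonChars_eq_fdChars : canonChars = fdChars := rfl

lemma find_eq_mat (S T : String) (i : Int) (hi0 : 0 ≤ i)
    (hiL : i + PySem.Str.len T ≤ (S.toList.length : Int)) :
    find (PySem.Str.slice S (some i) (some (i + PySem.Str.len T))) T
      = if mat S.toList i (PySem.Str.len T) (canonChars T.toList) then 1 else 0 := by
  have hL0 : 0 ≤ PySem.Str.len T := by rw [PySem.Str.len_eq]; positivity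
  have hbridge : (PySem.Str.slice S (some i) (some (i + PySem.Str.len T))).toList
      = PySem.List.slice S.toList (some i) (some (i + PySem.Str.len T)) := by
    simp [PySem.Str.slice]
  rw [mat_shift S.toList i (PySem.Str.len T) (canonChars T.toList) hi0 hL0 hiL]
  rw [mat_w_iff _ _ (by rw [canonChars_eq_fdChars]; exact fdChars_head T.toList)]
  unfold find fd
  rw [hbridge, canonChars_eq_fdChars]

-- ===== VERDICT (by name: the statement is the Claim_ definition above) =====
theorem solve_spec : Claim_equal_solve := by
  unfold Claim_equal_solve
  intro S T _
  unfold Spec_solve solve solve_alt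
  simp only []
  rw [PySem.List.foldl_add, zero_add]
  have hmap : (PySem.List.pyRange 0 (PySem.Str.len S - PySem.Str.len T + 1)).map
        (fun i => find (PySem.Str.slice S (some i) (some (i + PySem.Str.len T))) T)
      = (PySem.List.pyRange 0 (PySem.Str.len S - PySem.Str.len T + 1)).map
        (fun i => if mat S.toList i (PySem.Str.len T) (canonChars T.toList) then (1 : Int) else 0) := by
    apply List.map_congr_left
    intro i hi
    rw [PySem.List.mem_pyRange_one] at hi
    refine find_eq_mat S T i hi.1 ?_
    have h2 := hi.2
    rw [PySem.Str.len_eq S] at h2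
    omega
  rw [hmap, PySem.List.sum_map_ite_one_zero]
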